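-- pv_equiv track=rewrite | github.com/fredrik-rose/AdventOfCode2022 | adventofcode/day15/15.py | count_coverage
-- ===== SOURCE A (Python) =====
-- def count_coverage(segments):
--     events = create_x_events(segments)
--     active = 0
--     start = None
--     prev = None
--     coverage = 0
--     single_holes = []
--     for position, event in events:
--         active += event
--         if active == -1 and start is None:
--             start = position
--             if prev is not None and position - prev == 2:
--                 single_holes.append(position - 1)
--         if active == 0:
--             coverage += position - start + 1
--             start = None
--         prev = position
--     return int(coverage), single_holes
--
-- def create_x_events(segments):
--     events = []
--     for start, end in segments:
--         events.append((start, -1))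
--         events.append((end, 1))
--     return sorted(events)
-- ===== SOURCE B (Python) =====
-- def count_coverage(segments):
--     starts = sorted([s for s, _ in segments])
--     ends = sorted([e for _, e in segments])
--     coverage = 0
--     single_holes = []
--     depth = 0
--     region_start = None
--     last = None
--     n = len(starts)
--     i = 0
--     for e in ends:
--         while i < n and starts[i] <= e:
--             pos = starts[i]
--             i += 1
--             depth += 1
--             if depth == 1 and region_start is None:
--                 region_start = pos
--                 if last is not None and pos - last == 2:
--                     single_holes.append(pos - 1)
--             if depth == 0:
--                 coverage += pos - region_start + 1
--                 region_start = None
--             last = pos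
--         depth -= 1
--         if depth == 0:
--             coverage += e - region_start + 1
--             region_start = None
--         last = e
--     while i < n:
--         pos = starts[i]
--         i += 1
--         depth += 1
--         if depth == 1 and region_start is None:
--             region_start = pos
--             if last is not None and pos - last == 2:
--                 single_holes.append(pos - 1)
--         if depth == 0:
--             coverage += pos - region_start + 1
--             region_start = None
--         last = pos
--     return coverage, single_holes
-- ===== Notes on version B (the rewrite author's own statement) =====
-- stated objective: alternative
-- what changed: B sorts the start and end positions into two separate arrays and runs a two-pointer depth sweep over them (for each end, absorb the starts up to it), instead of A's building a combined list of signed (position,+-1) endpoint events, sorting the 2n events together and folding an active counter over them.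
import Mathlib
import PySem

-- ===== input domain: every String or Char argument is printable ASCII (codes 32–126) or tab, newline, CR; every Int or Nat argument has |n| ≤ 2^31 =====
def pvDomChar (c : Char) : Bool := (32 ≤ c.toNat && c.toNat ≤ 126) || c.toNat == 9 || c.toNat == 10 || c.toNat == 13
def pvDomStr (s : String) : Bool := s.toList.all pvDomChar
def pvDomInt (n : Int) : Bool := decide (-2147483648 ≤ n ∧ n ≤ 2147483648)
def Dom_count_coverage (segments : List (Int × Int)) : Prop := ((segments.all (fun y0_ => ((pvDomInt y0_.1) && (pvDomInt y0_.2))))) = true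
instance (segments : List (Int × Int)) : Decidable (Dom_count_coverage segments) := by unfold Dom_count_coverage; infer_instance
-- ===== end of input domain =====

-- B replaces A's tagged-event sweep (split each segment into (start,-1)/(end,1), sort the 2n signed
-- events together, count active depth) by a two-pointer sweep over the separately sorted start and
-- end positions (alternative algorithm, same cost).

-- ===== PORT A =====
-- loop body of count_coverage's `for position, event in events` loop; state = (active, start, prev, coverage, single_holes)
def stepA (st : Int × Option Int × Option Int × Int × List Int) (ev : Int × Int) :
    Int × Option Int × Option Int × Int × List Int :=
  let active := st.1 + ev.2
  let start := st.2.1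
  let prev := st.2.2.1
  let coverage := st.2.2.2.1
  let holes := st.2.2.2.2
  let start1 := if active = -1 ∧ start = none then some ev.1 else start
  let holes1 := if active = -1 ∧ start = none then
      (match prev with
       | some p => if ev.1 - p = 2 then holes ++ [ev.1 - 1] else holes
       | none => holes)
    else holes
  -- `start1.getD 0`: Python raises TypeError here when start is None; unreachable under Pre_count_coverage
  let coverage1 := if active = 0 then coverage + ev.1 - start1.getD 0 + 1 else coverage
  let start2 := if active = 0 then none else start1
  (active, start2, some ev.1, coverage1, holes1)

def create_x_events (segments : List (Int × Int)) : List (Int × Int) :=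
  let events := segments.foldl (fun events se => (events ++ [(se.1, -1)]) ++ [(se.2, 1)]) []
  PySem.List.sorted2 events (·.1) (·.2)

def count_coverage (segments : List (Int × Int)) : Int × List Int :=
  let events := create_x_events segments
  let fin := events.foldl stepA ((0 : Int), (none : Option Int), (none : Option Int), (0 : Int), ([] : List Int))
  (fin.2.2.2.1, fin.2.2.2.2)

-- ===== PORT B =====
-- start-step body of B's inner while loop; state = (depth, region_start, last, coverage, single_holes)
def stepStart (st : Int × Option Int × Option Int × Int × List Int) (s : Int) :
    Int × Option Int × Option Int × Int × List Int :=
  let depth := st.1 + 1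
  let region := if depth = 1 ∧ st.2.1 = none then some s else st.2.1
  let holes := if depth = 1 ∧ st.2.1 = none then
      (match st.2.2.1 with
       | some p => if s - p = 2 then st.2.2.2.2 ++ [s - 1] else st.2.2.2.2
       | none => st.2.2.2.2)
    else st.2.2.2.2
  -- `region.getD 0`: Python raises TypeError here when region_start is None; unreachable under Pre_count_coverage
  let cov := if depth = 0 then st.2.2.2.1 + s - region.getD 0 + 1 else st.2.2.2.1
  let region2 := if depth = 0 then none else region
  (depth, region2, some s, cov, holes)

-- end-step body of B's outer for loop
def stepEnd (st : Int × Option Int × Option Int × Int × List Int) (e : Int) :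
    Int × Option Int × Option Int × Int × List Int :=
  let depth := st.1 - 1
  -- `st.2.1.getD 0`: Python raises TypeError here when region_start is None; unreachable under Pre_count_coverage
  let cov := if depth = 0 then st.2.2.2.1 + e - st.2.1.getD 0 + 1 else st.2.2.2.1
  let region := if depth = 0 then none else st.2.1
  (depth, region, some e, cov, st.2.2.2.2)

-- B's inner `while i < n and starts[i] <= e` loop: absorb the starts up to e, return the rest
def takeStarts : List Int → Int → (Int × Option Int × Option Int × Int × List Int) →
    List Int × (Int × Option Int × Option Int × Int × List Int)
  | [], _, st => ([], st)
  | s :: starts', e, st =>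
    if s ≤ e then takeStarts starts' e (stepStart st s) else (s :: starts', st)

-- B's trailing `while i < n` loop: the starts left after the last end
def finishStarts : List Int → (Int × Option Int × Option Int × Int × List Int) →
    Int × Option Int × Option Int × Int × List Int
  | [], st => st
  | s :: starts', st => finishStarts starts' (stepStart st s)

-- B's outer `for e in ends` loop
def loopB : List Int → List Int → (Int × Option Int × Option Int × Int × List Int) →
    Int × Option Int × Option Int × Int × List Int
  | starts, [], st => finishStarts starts st
  | starts, e :: ends', st =>
    match takeStarts starts e st with
    | (starts', st') => loopB starts' ends' (stepEnd st' e)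

def count_coverage_alt (segments : List (Int × Int)) : Int × List Int :=
  let starts := PySem.List.sorted (segments.map (·.1)) (fun x => x)
  let ends := PySem.List.sorted (segments.map (·.2)) (fun x => x)
  let fin := loopB starts ends ((0 : Int), (none : Option Int), (none : Option Int), (0 : Int), ([] : List Int))
  (fin.2.2.2.1, fin.2.2.2.2)

-- ===== PRECONDITION & SPEC =====
-- Pre_ is exactly the inputs on which A returns normally: no position is reached by more segment
-- ends than segment starts (otherwise A's sweep hits `coverage += position - None` and raises TypeError).
def Pre_count_coverage (segments : List (Int × Int)) : Prop :=
  ∀ se ∈ segments,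
    (segments.map (·.2)).countP (fun x => decide (x ≤ se.2)) ≤
      (segments.map (·.1)).countP (fun x => decide (x ≤ se.2))
instance (segments : List (Int × Int)) : Decidable (Pre_count_coverage segments) := by
  unfold Pre_count_coverage; infer_instance

def pvWitness_count_coverage : (List (Int × Int)) := [(-3, 1), (4, 4), (7, 9)]

def Spec_count_coverage (segments : List (Int × Int)) (out : Int × List Int) : Prop := out = count_coverage_alt segments
instance (segments : List (Int × Int)) (out : Int × List Int) : Decidable (Spec_count_coverage segments out) := by unfold Spec_count_coverage; infer_instance

-- ===== CLAIM (what is proved, stated in full; the proofs are below) =====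
def Claim_equal_count_coverage : Prop := ∀ (segments : List (Int × Int)), Dom_count_coverage segments → Pre_count_coverage segments → Spec_count_coverage segments (count_coverage segments)

-- ===== LEMMAS AND PROOFS =====

-- Python's lexicographic order on int pairs
def lexLe (a b : Int × Int) : Prop := a.1 < b.1 ∨ (a.1 = b.1 ∧ a.2 ≤ b.2)

def lexLtB (a b : Int × Int) : Bool :=
  decide (a.1 < b.1) || (!decide (b.1 < a.1) && decide (a.2 < b.2))

theorem lexLe_trans {a b c : Int × Int} (h1 : lexLe a b) (h2 : lexLe b c) : lexLe a c := by
  unfold lexLe at *; omega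

theorem lexLe_antisymm {a b : Int × Int} (h1 : lexLe a b) (h2 : lexLe b a) : a = b := by
  unfold lexLe at *
  have : a.1 = b.1 ∧ a.2 = b.2 := by omega
  exact Prod.ext this.1 this.2

theorem lexLe_of_lexLtB {a b : Int × Int} (h : lexLtB a b = true) : lexLe a b := by
  unfold lexLtB at h; unfold lexLe; simp at h; omega

theorem lexLe_of_not_lexLtB {a b : Int × Int} (h : lexLtB a b = false) : lexLe b a := by
  unfold lexLtB at h; unfold lexLe; simp at h; omega

theorem insertBy_lex_pairwise (x : Int × Int) (ys : List (Int × Int))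
    (h : List.Pairwise lexLe ys) :
    List.Pairwise lexLe (PySem.List.insertBy lexLtB x ys) := by
  induction ys with
  | nil => simp [PySem.List.insertBy]
  | cons y ys ih =>
    rw [List.pairwise_cons] at h
    by_cases hb : lexLtB x y = true
    · rw [show PySem.List.insertBy lexLtB x (y :: ys) = x :: y :: ys from by
        simp [PySem.List.insertBy, hb]]
      refine List.Pairwise.cons ?_ (List.Pairwise.cons h.1 h.2)
      intro z hz
      rcases List.mem_cons.1 hz with rfl | hz'
      · exact lexLe_of_lexLtB hb
      · exact lexLe_trans (lexLe_of_lexLtB hb) (h.1 z hz')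
    · rw [show PySem.List.insertBy lexLtB x (y :: ys) = y :: PySem.List.insertBy lexLtB x ys from by
        simp [PySem.List.insertBy, hb]]
      refine List.Pairwise.cons ?_ (ih h.2)
      intro z hz
      rw [PySem.List.insertBy_mem_iff] at hz
      rcases hz with rfl | hz
      · exact lexLe_of_not_lexLtB (by simpa using hb)
      · exact h.1 z hz

theorem sorted2_eq_foldl (l : List (Int × Int)) :
    PySem.List.sorted2 l (·.1) (·.2) =
      l.foldl (fun acc x => PySem.List.insertBy lexLtB x acc) [] := rfl

theorem foldl_insertBy_pairwise (l : List (Int × Int)) :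
    ∀ acc, List.Pairwise lexLe acc →
      List.Pairwise lexLe (l.foldl (fun acc x => PySem.List.insertBy lexLtB x acc) acc) := by
  induction l with
  | nil => intro acc h; simpa using h
  | cons x l ih =>
    intro acc h
    simpa using ih _ (insertBy_lex_pairwise x acc h)

theorem sorted2_lex_pairwise (l : List (Int × Int)) :
    List.Pairwise lexLe (PySem.List.sorted2 l (·.1) (·.2)) := by
  rw [sorted2_eq_foldl]
  exact foldl_insertBy_pairwise l [] (by simp)

theorem sorted2_eq_of_perm_of_pairwise {l ys : List (Int × Int)}
    (hp : ys.Perm l) (hs : List.Pairwise lexLe ys) :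
    PySem.List.sorted2 l (·.1) (·.2) = ys := by
  refine List.Perm.eq_of_pairwise (fun a b _ _ h1 h2 => lexLe_antisymm h1 h2)
    (sorted2_lex_pairwise l) hs ?_
  exact (PySem.List.sorted2_perm l _ _ _).trans hp.symm

theorem sorted2_congr_perm {l₁ l₂ : List (Int × Int)} (h : l₁.Perm l₂) :
    PySem.List.sorted2 l₁ (·.1) (·.2) = PySem.List.sorted2 l₂ (·.1) (·.2) := by
  exact sorted2_eq_of_perm_of_pairwise
    ((PySem.List.sorted2_perm l₂ _ _ _).trans h.symm) (sorted2_lex_pairwise l₂)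

theorem sorted2_eq_cons {l r : List (Int × Int)} {x : Int × Int}
    (hperm : l.Perm (x :: r)) (hmin : ∀ y ∈ l, lexLe x y) :
    PySem.List.sorted2 l (·.1) (·.2) = x :: PySem.List.sorted2 r (·.1) (·.2) := by
  refine sorted2_eq_of_perm_of_pairwise ?_ ?_
  · exact (List.Perm.cons x (PySem.List.sorted2_perm r _ _ _)).trans hperm.symm
  · refine List.Pairwise.cons ?_ (sorted2_lex_pairwise r)
    intro y hy
    have : y ∈ r := ((PySem.List.sorted2_perm r _ _ _).mem_iff).1 hy
    exact hmin y (hperm.mem_iff.2 (List.mem_cons_of_mem x this))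

-- the raw (unsorted) event list of a segment list
def evsOf (ts : List (Int × Int)) : List (Int × Int) :=
  ts.flatMap (fun se => [(se.1, -1), (se.2, 1)])

def outA (a : Int × Option Int × Option Int × Int × List Int) : Int × List Int :=
  (a.2.2.2.1, a.2.2.2.2)

-- the hole bookkeeping both programs perform when a region opens
def holeUpd (last : Option Int) (s : Int) (holes : List Int) : List Int :=
  match last with
  | some p => if s - p = 2 then holes ++ [s - 1] else holes
  | none => holes

theorem stepA_open (last : Option Int) (cov : Int) (holes : List Int) (s : Int) :
    stepA (0, none, last, cov, holes) (s, -1) = (-1, some s, some s, cov, holeUpd last s holes) := by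
  simp [stepA, holeUpd]

theorem stepA_deepStart (k : Int) (hk : k ≤ -1) (r : Int) (last : Option Int) (cov : Int)
    (holes : List Int) (s : Int) :
    stepA (k, some r, last, cov, holes) (s, -1) = (k + -1, some r, some s, cov, holes) := by
  simp [stepA]
  omega

theorem stepA_deepEnd (k : Int) (hk : k ≤ -2) (r : Int) (last : Option Int) (cov : Int)
    (holes : List Int) (e : Int) :
    stepA (k, some r, last, cov, holes) (e, 1) = (k + 1, some r, some e, cov, holes) := by
  simp [stepA]
  omega

theorem stepA_close (r : Int) (last : Option Int) (cov : Int) (holes : List Int) (e : Int) :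
    stepA (-1, some r, last, cov, holes) (e, 1) = (0, none, some e, cov + e - r + 1, holes) := by
  simp [stepA]

theorem stepStart_open (last : Option Int) (cov : Int) (holes : List Int) (s : Int) :
    stepStart (0, none, last, cov, holes) s = (1, some s, some s, cov, holeUpd last s holes) := by
  simp [stepStart, holeUpd]

theorem stepStart_deep (d : Int) (hd : 1 ≤ d) (reg : Option Int) (last : Option Int) (cov : Int)
    (holes : List Int) (s : Int) :
    stepStart (d, reg, last, cov, holes) s = (d + 1, reg, some s, cov, holes) := by
  simp [stepStart, show d + 1 ≠ 0 from by omega, show d + 1 ≠ 1 from by omega]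

theorem stepEnd_close (r : Int) (last : Option Int) (cov : Int) (holes : List Int) (e : Int) :
    stepEnd (1, some r, last, cov, holes) e = (0, none, some e, cov + e - r + 1, holes) := by
  simp [stepEnd]

theorem stepEnd_deep (d : Int) (hd : 2 ≤ d) (reg : Option Int) (last : Option Int) (cov : Int)
    (holes : List Int) (e : Int) :
    stepEnd (d, reg, last, cov, holes) e = (d - 1, reg, some e, cov, holes) := by
  simp [stepEnd]
  omega

-- the tagged merge input: starts as (s,-1), ends as (e,1)
def tagged (S E : List Int) : List (Int × Int) :=
  S.map (fun s => (s, -1)) ++ E.map (fun e => (e, 1))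

theorem evsOf_perm_tagged (segments : List (Int × Int)) :
    (evsOf segments).Perm (tagged (segments.map (·.1)) (segments.map (·.2))) := by
  induction segments with
  | nil => simp [evsOf, tagged]
  | cons se rest ih =>
    simp only [evsOf, tagged, List.flatMap_cons, List.map_cons, List.cons_append] at *
    refine List.Perm.cons _ ?_
    exact (List.Perm.cons _ ih).trans List.perm_middle.symm

theorem raw_events_eq (segments : List (Int × Int)) :
    segments.foldl (fun events se => (events ++ [(se.1, -1)]) ++ [(se.2, 1)]) [] = evsOf segments := by
  have h : (fun (events : List (Int × Int)) (se : Int × Int) =>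
      (events ++ [(se.1, -1)]) ++ [(se.2, 1)]) =
      (fun events se => events ++ [(se.1, -1), (se.2, 1)]) := by
    funext events se; simp
  rw [h]
  simpa [evsOf] using
    PySem.List.foldl_append_eq_flatMap (fun (se : Int × Int) => [(se.1, -1), (se.2, 1)]) segments []

theorem loopB_cons (S : List Int) (e : Int) (E' : List Int)
    (st : Int × Option Int × Option Int × Int × List Int) :
    loopB S (e :: E') st = loopB (takeStarts S e st).1 E' (stepEnd (takeStarts S e st).2 e) := rfl

theorem loopB_start {s e : Int} (hse : s ≤ e) (S' E' : List Int)
    (st : Int × Option Int × Option Int × Int × List Int) :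
    loopB (s :: S') (e :: E') st = loopB S' (e :: E') (stepStart st s) := by
  rw [loopB_cons, loopB_cons, show takeStarts (s :: S') e st = takeStarts S' e (stepStart st s)
    from by simp [takeStarts, hse]]

-- the main simulation: A's sweep over the sorted tagged events equals B's two-pointer loop,
-- as long as no prefix of the events has more ends than starts (= `depth` stays the invariant)
theorem loopSim : ∀ (n : Nat) (S E : List Int) (depth : Int) (region last : Option Int)
    (cov : Int) (holes : List Int),
    S.length + E.length ≤ n →
    List.Pairwise (· ≤ ·) S →
    List.Pairwise (· ≤ ·) E →
    depth = (E.length : Int) - (S.length : Int) →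
    0 ≤ depth →
    (region = none ↔ depth = 0) →
    (∀ v ∈ E, (E.countP (fun x => decide (x ≤ v)) : Int) ≤
        (S.countP (fun x => decide (x ≤ v)) : Int) + depth) →
    outA ((PySem.List.sorted2 (tagged S E) (·.1) (·.2)).foldl stepA
        (-depth, region, last, cov, holes))
      = outA (loopB S E (depth, region, last, cov, holes)) := by
  intro n
  induction n with
  | zero =>
    intro S E depth region last cov holes hn hS hE hd hd0 hreg hhall
    have h0 : S.length = 0 ∧ E.length = 0 := by omega
    obtain ⟨h1, h2⟩ := h0
    rw [List.length_eq_zero_iff] at h1 h2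
    subst h1; subst h2
    rfl
  | succ n ih =>
    intro S E depth region last cov holes hn hS hE hd hd0 hreg hhall
    cases E with
    | nil =>
      have hS0 : S = [] := by
        have : S.length = 0 := by simp only [List.length_nil] at hd; omega
        rwa [List.length_eq_zero_iff] at this
      subst hS0
      rfl
    | cons e E' =>
      have heE : ∀ v ∈ E', e ≤ v := (List.pairwise_cons.1 hE).1
      cases S with
      | nil =>
        -- next event is the end (e, 1)
        have hd1 : 1 ≤ depth := by
          have h1 := hhall e (by simp)
          rw [List.countP_cons] at h1
          simp at h1
          omega
        obtain ⟨r, hr⟩ : ∃ r, region = some r := by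
          rcases region with _ | r
          · exact absurd (hreg.1 rfl) (by omega)
          · exact ⟨r, rfl⟩
        have hpeel : PySem.List.sorted2 (tagged [] (e :: E')) (·.1) (·.2)
            = (e, 1) :: PySem.List.sorted2 (tagged [] E') (·.1) (·.2) := by
          apply sorted2_eq_cons
          · exact List.Perm.refl _
          · intro y hy
            simp only [tagged, List.map_nil, List.nil_append, List.mem_map] at hy
            obtain ⟨v, hv, rfl⟩ := hy
            rcases List.mem_cons.1 hv with rfl | hv'
            · exact Or.inr ⟨rfl, le_refl _⟩
            · have := heE v hv'
              unfold lexLe; simp; omega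
        have hhall' : ∀ v ∈ E', ((E'.countP (fun x => decide (x ≤ v)) : Int)) ≤
            (([] : List Int).countP (fun x => decide (x ≤ v)) : Int) + (depth - 1) := by
          intro v hv
          have h1 := hhall v (List.mem_cons_of_mem e hv)
          rw [List.countP_cons] at h1
          simp only [decide_eq_true_eq, heE v hv, if_pos] at h1
          push_cast at h1 ⊢
          omega
        rw [hpeel, List.foldl_cons, hr]
        by_cases hone : depth = 1
        · subst hone
          rw [show (-(1 : Int)) = -1 from rfl, stepA_close,
            show loopB [] (e :: E') (1, some r, last, cov, holes)
              = loopB [] E' (stepEnd (1, some r, last, cov, holes) e) from rfl,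
            stepEnd_close]
          have := ih [] E' 0 none (some e) (cov + e - r + 1) holes
            (by simp only [List.length_nil, List.length_cons] at hn ⊢; omega) (by simp) ((List.pairwise_cons.1 hE).2)
            (by simp only [List.length_nil, List.length_cons] at hd ⊢; omega) (le_refl 0) (by simp)
            (by simpa using hhall')
          simpa using this
        · have hd2 : 2 ≤ depth := by omega
          rw [show (-depth) = (-depth) from rfl, stepA_deepEnd (-depth) (by omega),
            show loopB [] (e :: E') (depth, some r, last, cov, holes)
              = loopB [] E' (stepEnd (depth, some r, last, cov, holes) e) from rfl,
            stepEnd_deep depth hd2, show (-depth + 1 : Int) = -(depth - 1) from by ring]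
          exact ih [] E' (depth - 1) (some r) (some e) cov holes
            (by simp only [List.length_nil, List.length_cons] at hn ⊢; omega) (by simp) ((List.pairwise_cons.1 hE).2)
            (by simp only [List.length_nil, List.length_cons] at hd ⊢; omega) (by omega)
            (by constructor <;> (intro h; simp at h <;> omega)) hhall'
      | cons s S' =>
        have hsS : ∀ x ∈ S', s ≤ x := (List.pairwise_cons.1 hS).1
        by_cases hse : s ≤ e
        · -- next event is the start (s, -1)
          have hpeel : PySem.List.sorted2 (tagged (s :: S') (e :: E')) (·.1) (·.2)
              = (s, -1) :: PySem.List.sorted2 (tagged S' (e :: E')) (·.1) (·.2) := by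
            apply sorted2_eq_cons
            · exact List.Perm.refl _
            · intro y hy
              rcases List.mem_append.1 hy with h | h
              · rw [List.mem_map] at h
                obtain ⟨x, hx, rfl⟩ := h
                have : s ≤ x := by
                  rcases List.mem_cons.1 hx with rfl | hx'
                  · exact le_refl _
                  · exact hsS x hx'
                unfold lexLe; simp; omega
              · rw [List.mem_map] at h
                obtain ⟨v, hv, rfl⟩ := h
                have : e ≤ v := by
                  rcases List.mem_cons.1 hv with rfl | hv'
                  · exact le_refl _
                  · exact heE v hv'
                unfold lexLe; simp; omega
          have hhall' : ∀ v ∈ (e :: E'), (((e :: E').countP (fun x => decide (x ≤ v)) : Int)) ≤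
              ((S'.countP (fun x => decide (x ≤ v)) : Int)) + (depth + 1) := by
            intro v hv
            have h1 := hhall v hv
            rw [List.countP_cons (l := S')] at h1
            push_cast at h1 ⊢
            split at h1 <;> omega
          rw [hpeel, List.foldl_cons, loopB_start hse]
          by_cases hzero : depth = 0
          · subst hzero
            rw [hreg.2 rfl, show (-(0 : Int)) = 0 from rfl, stepA_open, stepStart_open]
            have := ih S' (e :: E') 1 (some s) (some s) cov (holeUpd last s holes)
              (by simp only [List.length_cons] at hn ⊢; omega) ((List.pairwise_cons.1 hS).2) hE
              (by simp only [List.length_cons] at hd ⊢; omega) (by omega) (by simp)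
              (by simpa using hhall')
            simpa using this
          · have hd1 : 1 ≤ depth := by omega
            obtain ⟨r, hr⟩ : ∃ r, region = some r := by
              rcases region with _ | r
              · exact absurd (hreg.1 rfl) hzero
              · exact ⟨r, rfl⟩
            rw [hr, stepA_deepStart (-depth) (by omega), stepStart_deep depth hd1,
              show (-depth + -1 : Int) = -(depth + 1) from by ring]
            exact ih S' (e :: E') (depth + 1) (some r) (some s) cov holes
              (by simp only [List.length_cons] at hn ⊢; omega) ((List.pairwise_cons.1 hS).2) hE
              (by simp only [List.length_cons] at hd ⊢; omega) (by omega)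
              (by constructor <;> (intro h; simp at h <;> omega)) hhall'
        · -- next event is the end (e, 1)
          have hes : e < s := by omega
          have hcntS : (s :: S').countP (fun x => decide (x ≤ e)) = 0 := by
            rw [List.countP_eq_zero]
            intro x hx
            rcases List.mem_cons.1 hx with rfl | hx'
            · simp; omega
            · have := hsS x hx'
              simp; omega
          have hd1 : 1 ≤ depth := by
            have h1 := hhall e (by simp)
            rw [List.countP_cons (l := E'), hcntS] at h1
            simp at h1
            omega
          obtain ⟨r, hr⟩ : ∃ r, region = some r := by
            rcases region with _ | r
            · exact absurd (hreg.1 rfl) (by omega)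
            · exact ⟨r, rfl⟩
          have hpeel : PySem.List.sorted2 (tagged (s :: S') (e :: E')) (·.1) (·.2)
              = (e, 1) :: PySem.List.sorted2 (tagged (s :: S') E') (·.1) (·.2) := by
            apply sorted2_eq_cons
            · exact List.perm_middle
            · intro y hy
              rcases List.mem_append.1 hy with h | h
              · rw [List.mem_map] at h
                obtain ⟨x, hx, rfl⟩ := h
                have : e < x := by
                  rcases List.mem_cons.1 hx with rfl | hx'
                  · exact hes
                  · exact lt_of_lt_of_le hes (hsS x hx')
                unfold lexLe; simp; omega
              · rw [List.mem_map] at h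
                obtain ⟨v, hv, rfl⟩ := h
                have : e ≤ v := by
                  rcases List.mem_cons.1 hv with rfl | hv'
                  · exact le_refl _
                  · exact heE v hv'
                unfold lexLe; simp; omega
          have hstop : takeStarts (s :: S') e (depth, some r, last, cov, holes)
              = (s :: S', (depth, some r, last, cov, holes)) := by
            simp [takeStarts, hse]
          have hhall' : ∀ v ∈ E', ((E'.countP (fun x => decide (x ≤ v)) : Int)) ≤
              (((s :: S').countP (fun x => decide (x ≤ v)) : Int)) + (depth - 1) := by
            intro v hv
            have h1 := hhall v (List.mem_cons_of_mem e hv)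
            rw [List.countP_cons (l := E')] at h1
            simp only [decide_eq_true_eq, heE v hv, if_pos] at h1
            push_cast at h1 ⊢
            omega
          rw [hpeel, List.foldl_cons, hr, loopB_cons, hstop]
          by_cases hone : depth = 1
          · subst hone
            rw [show (-(1 : Int)) = -1 from rfl, stepA_close, stepEnd_close]
            have := ih (s :: S') E' 0 none (some e) (cov + e - r + 1) holes
              (by simp only [List.length_cons] at hn ⊢; omega) hS ((List.pairwise_cons.1 hE).2)
              (by simp only [List.length_cons] at hd ⊢; omega) (le_refl 0) (by simp)
              (by simpa using hhall')
            simpa using this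
          · have hd2 : 2 ≤ depth := by omega
            rw [stepA_deepEnd (-depth) (by omega), stepEnd_deep depth hd2,
              show (-depth + 1 : Int) = -(depth - 1) from by ring]
            exact ih (s :: S') E' (depth - 1) (some r) (some e) cov holes
              (by simp only [List.length_cons] at hn ⊢; omega) hS ((List.pairwise_cons.1 hE).2)
              (by simp only [List.length_cons] at hd ⊢; omega) (by omega)
              (by constructor <;> (intro h; simp at h <;> omega)) hhall'

-- ===== VERDICT (by name: the statement is the Claim_ definition above) =====
theorem count_coverage_spec : Claim_equal_count_coverage := by
  intro segments _ hpre
  unfold Spec_count_coverage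
  have hSp : (PySem.List.sorted (segments.map (·.1)) (fun x => x)).Perm (segments.map (·.1)) :=
    PySem.List.sorted_perm _ _ _
  have hEp : (PySem.List.sorted (segments.map (·.2)) (fun x => x)).Perm (segments.map (·.2)) :=
    PySem.List.sorted_perm _ _ _
  set S := PySem.List.sorted (segments.map (·.1)) (fun x => x) with hSdef
  set E := PySem.List.sorted (segments.map (·.2)) (fun x => x) with hEdef
  have hSsort : List.Pairwise (· ≤ ·) S := by
    simpa using PySem.List.sorted_pairwise (segments.map (·.1)) (fun x => x)
  have hEsort : List.Pairwise (· ≤ ·) E := by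
    simpa using PySem.List.sorted_pairwise (segments.map (·.2)) (fun x => x)
  have hlen : E.length = S.length := by
    rw [hSp.length_eq, hEp.length_eq, List.length_map, List.length_map]
  have hev : create_x_events segments = PySem.List.sorted2 (tagged S E) (·.1) (·.2) := by
    unfold create_x_events
    rw [raw_events_eq]
    apply sorted2_congr_perm
    refine (evsOf_perm_tagged segments).trans ?_
    exact List.Perm.append ((hSp.symm).map _) ((hEp.symm).map _)
  have hhall0 : ∀ v ∈ E, ((E.countP (fun x => decide (x ≤ v)) : Int)) ≤
      ((S.countP (fun x => decide (x ≤ v)) : Int)) + 0 := by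
    intro v hv
    have hv' : v ∈ segments.map (·.2) := hEp.subset hv
    obtain ⟨se, hse, rfl⟩ := List.mem_map.1 hv'
    have h1 := hpre se hse
    rw [hEp.countP_eq, hSp.countP_eq]
    omega
  have hmain := loopSim (S.length + E.length) S E 0 none none 0 []
    le_rfl hSsort hEsort (by rw [hlen]; ring) (le_refl 0) (by simp) hhall0
  simp only [neg_zero] at hmain
  show count_coverage segments = count_coverage_alt segments
  unfold count_coverage count_coverage_alt
  rw [hev, ← hSdef, ← hEdef]
  exact hmain
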